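-- pv_equiv track=rewrite | github.com/mengyx-work/CS_algorithm_scripts | leetcode/LC_320. Generalized Abbreviation.py | combineNums
-- ===== SOURCE A (Python) =====
-- def combineNums(s):
--     stack = []
--     for char in s:
--         if char.isdigit() and len(stack)>0 and stack[-1].isdigit():
--             preNum = int(stack.pop())
--             num = int(char) + preNum
--             stack.append(str(num))
--         else:
--             stack.append(char)
--     return stack
-- ===== SOURCE B (Python) =====
-- def combineNums(s):
--     res = []
--     i = 0
--     n = len(s)
--     while i < n:
--         ch = s[i]
--         if ch.isdigit():
--             acc = ch
--             i += 1
--             while i < n and s[i].isdigit():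
--                 acc = str(int(acc) + int(s[i]))
--                 i += 1
--             res.append(acc)
--         else:
--             res.append(ch)
--             i += 1
--     return res
-- ===== Notes on version B (the rewrite author's own statement) =====
-- stated objective: alternative
-- what changed: B scans the string as maximal digit runs with an inner accumulator loop (index-based two-level scan) instead of A's stack with pop/peek-of-last adjacency checks.
import Mathlib
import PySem

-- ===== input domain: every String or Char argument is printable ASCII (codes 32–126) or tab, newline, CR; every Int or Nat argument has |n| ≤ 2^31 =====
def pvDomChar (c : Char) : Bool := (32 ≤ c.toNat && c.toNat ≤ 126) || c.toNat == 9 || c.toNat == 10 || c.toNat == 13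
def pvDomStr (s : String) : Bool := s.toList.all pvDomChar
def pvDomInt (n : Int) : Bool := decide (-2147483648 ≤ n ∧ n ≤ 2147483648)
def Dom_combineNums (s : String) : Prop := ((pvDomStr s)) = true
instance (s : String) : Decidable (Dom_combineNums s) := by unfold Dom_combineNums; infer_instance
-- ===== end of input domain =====

-- B rewrites A's stack-with-pop/peek loop as a two-level scan over maximal digit runs
-- with an inner string accumulator (objective: alternative decomposition, same cost).

-- ===== PORT A =====
-- A's stack is kept head-first (head = Python's stack[-1], append = cons); the result is
-- reversed once at the end — a faithful encoding of Python's append/pop-at-the-end list.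
def combineStep (stack : List String) (char : Char) : List String :=
  match stack with
  | top :: rest =>
    -- 'char.isdigit() and len(stack)>0 and stack[-1].isdigit()' (len(stack)>0 is the match arm)
    if PySem.Chars.isdigit char && PySem.Chars.strIsdigit top.toList then
      let preNum : Int := (PySem.Int.ofChars? top.toList).getD 0  -- int(stack.pop()); guarded by isdigit, never raises on Dom
      let num : Int := (PySem.Int.ofChars? [char]).getD 0 + preNum  -- int(char) + preNum
      String.ofList (PySem.Int.toChars num) :: rest
    else
      String.ofList [char] :: top :: rest
  | [] => String.ofList [char] :: []

def combineNums (s : String) : List String :=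
  (s.toList.foldl combineStep []).reverse

-- ===== PORT B =====
-- Source B's inner while loop: acc = str(int(acc) + int(ch)) over the rest of the digit run
def combineAccStep (acc : List Char) (d : Char) : List Char :=
  PySem.Int.toChars ((PySem.Int.ofChars? acc).getD 0 + (PySem.Int.ofChars? [d]).getD 0)

-- Source B's outer while loop: one step per maximal run of digits / per non-digit char
def combineRuns : List Char → List String
  | [] => []
  | c :: rest =>
    if PySem.Chars.isdigit c then
      String.ofList ((rest.takeWhile PySem.Chars.isdigit).foldl combineAccStep [c])
        :: combineRuns (rest.dropWhile PySem.Chars.isdigit)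
    else
      String.ofList [c] :: combineRuns rest
termination_by l => l.length
decreasing_by
  · exact Nat.lt_succ_of_le (List.length_dropWhile_le _ _)
  · exact Nat.lt_succ_self _

def combineNums_alt (s : String) : List String :=
  combineRuns s.toList

-- ===== PRECONDITION & SPEC =====
def Spec_combineNums (s : String) (out : List String) : Prop := out = combineNums_alt s
instance (s : String) (out : List String) : Decidable (Spec_combineNums s out) := by unfold Spec_combineNums; infer_instance

-- ===== CLAIM (what is proved, stated in full; the proofs are below) =====
def Claim_equal_combineNums : Prop := ∀ (s : String), Dom_combineNums s → Spec_combineNums s (combineNums s)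

-- ===== LEMMAS AND PROOFS =====

-- an ASCII digit is one of '0'..'9'
theorem pv_digit_mem (c : Char) (h : PySem.Chars.isdigit c = true) :
    c ∈ ['0','1','2','3','4','5','6','7','8','9'] := by
  simp [PySem.Chars.isdigit, Char.le_def, UInt32.le_iff_toNat_le] at h
  obtain ⟨h1, h2⟩ := h
  have hx : c.toNat = 48 ∨ c.toNat = 49 ∨ c.toNat = 50 ∨ c.toNat = 51 ∨ c.toNat = 52 ∨
      c.toNat = 53 ∨ c.toNat = 54 ∨ c.toNat = 55 ∨ c.toNat = 56 ∨ c.toNat = 57 := by omega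
  have he : ∀ (d : Char), c.toNat = d.toNat → c = d := by
    intro d hd; apply Char.ext; exact UInt32.toNat_inj.mp hd
  simp only [List.mem_cons]
  rcases hx with h|h|h|h|h|h|h|h|h|h
  · exact Or.inl (he '0' h)
  · exact Or.inr (Or.inl (he '1' h))
  · exact Or.inr (Or.inr (Or.inl (he '2' h)))
  · exact Or.inr (Or.inr (Or.inr (Or.inl (he '3' h))))
  · exact Or.inr (Or.inr (Or.inr (Or.inr (Or.inl (he '4' h)))))
  · exact Or.inr (Or.inr (Or.inr (Or.inr (Or.inr (Or.inl (he '5' h))))))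
  · exact Or.inr (Or.inr (Or.inr (Or.inr (Or.inr (Or.inr (Or.inl (he '6' h)))))))
  · exact Or.inr (Or.inr (Or.inr (Or.inr (Or.inr (Or.inr (Or.inr (Or.inl (he '7' h))))))))
  · exact Or.inr (Or.inr (Or.inr (Or.inr (Or.inr (Or.inr (Or.inr (Or.inr (Or.inl (he '8' h)))))))))
  · exact Or.inr (Or.inr (Or.inr (Or.inr (Or.inr (Or.inr (Or.inr (Or.inr (Or.inr (Or.inl (he '9' h))))))))))

theorem pv_digit_not_space (c : Char) (h : PySem.Chars.isdigit c = true) :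
    PySem.Int.isIntSpace c = false := by
  have hm := pv_digit_mem c h
  fin_cases hm <;> decide

theorem pv_dropWhile_no_space (l : List Char) (h : ∀ x ∈ l, PySem.Chars.isdigit x = true) :
    l.dropWhile PySem.Int.isIntSpace = l := by
  cases l with
  | nil => rfl
  | cons c t => simp [pv_digit_not_space c (h c (List.mem_cons_self))]

theorem pv_bind_pure_nonneg (o : Option Nat) :
    0 ≤ (Option.map (fun n : Int => n) (o >>= fun a => pure ((a : Nat) : Int))).getD 0 := by
  cases o <;> simp

-- int(ds) of a nonempty all-digit string is never negative (whatever the private parser returns)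
theorem pv_parse_digits_nonneg (c : Char) (rest : List Char)
    (h : ∀ x ∈ c :: rest, PySem.Chars.isdigit x = true) :
    0 ≤ (PySem.Int.ofChars? (c :: rest)).getD 0 := by
  have hrev : ∀ x ∈ (c :: rest).reverse, PySem.Chars.isdigit x = true := by
    intro x hx; exact h x (List.mem_reverse.mp hx)
  have hc := h c (List.mem_cons_self)
  simp only [PySem.Int.ofChars?, pv_dropWhile_no_space _ h, pv_dropWhile_no_space _ hrev,
    List.reverse_reverse]
  split
  case _ ds heq =>
    rw [List.cons.injEq] at heq; obtain ⟨hc', -⟩ := heq; subst hc'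
    simp [PySem.Chars.isdigit] at hc
  case _ ds heq =>
    rw [List.cons.injEq] at heq; obtain ⟨hc', -⟩ := heq; subst hc'
    simp [PySem.Chars.isdigit] at hc
  case _ =>
    exact pv_bind_pure_nonneg _

-- str(n) of a nonnegative int is a nonempty all-digit string
theorem pv_toChars_strIsdigit (n : Int) (h : 0 ≤ n) :
    PySem.Chars.strIsdigit (PySem.Int.toChars n) = true := by
  simp [PySem.Int.toChars, Int.not_lt.mpr h, PySem.Chars.strIsdigit]
  constructor
  · intro he; have := @Nat.length_toDigits_pos 10 n.toNat; simp [he] at this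
  · intro c hc
    have := Nat.isDigit_of_mem_toDigits (by norm_num) (by norm_num) hc
    simp [Char.isDigit] at this
    simp [PySem.Chars.isdigit, Char.le_def, UInt32.le_iff_toNat_le]
    exact this

theorem pv_strIsdigit_nonneg (t : List Char) (h : PySem.Chars.strIsdigit t = true) :
    0 ≤ (PySem.Int.ofChars? t).getD 0 := by
  cases t with
  | nil => simp [PySem.Chars.strIsdigit] at h
  | cons c rest =>
      simp [PySem.Chars.strIsdigit] at h
      refine pv_parse_digits_nonneg c rest ?_
      intro x hx
      rcases List.mem_cons.mp hx with h' | h'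
      · subst h'; exact h.1
      · exact h.2 x h'

theorem pv_strIsdigit_singleton (c : Char) :
    PySem.Chars.strIsdigit [c] = PySem.Chars.isdigit c := by
  simp [PySem.Chars.strIsdigit]

-- B's accumulator step keeps the accumulator a nonempty all-digit string
theorem pv_accStep_isdigit (acc : List Char) (d : Char)
    (hacc : PySem.Chars.strIsdigit acc = true) (hd : PySem.Chars.isdigit d = true) :
    PySem.Chars.strIsdigit (combineAccStep acc d) = true := by
  unfold combineAccStep
  apply pv_toChars_strIsdigit
  have h1 := pv_strIsdigit_nonneg acc hacc
  have h2 := pv_strIsdigit_nonneg [d] (by rw [pv_strIsdigit_singleton]; exact hd)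
  omega

-- the main simulation: A's fold, run against B's run decomposition.
-- MAIN : with a non-digit (or no) top of stack, A's fold appends exactly B's output.
-- RUN  : with a digit-string top acc, A's fold finishes the run exactly as B's inner fold.
theorem pv_main_run : ∀ (N : Nat) (cs : List Char), cs.length ≤ N →
    (∀ (stack : List String), (∀ t ∈ stack.head?, PySem.Chars.strIsdigit t.toList = false) →
      cs.foldl combineStep stack = (combineRuns cs).reverse ++ stack) ∧
    (∀ (acc : List Char) (stack : List String), PySem.Chars.strIsdigit acc = true →
      cs.foldl combineStep (String.ofList acc :: stack)
        = (combineRuns (cs.dropWhile PySem.Chars.isdigit)).reverse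
            ++ [String.ofList ((cs.takeWhile PySem.Chars.isdigit).foldl combineAccStep acc)]
            ++ stack) := by
  intro N
  induction N with
  | zero =>
      intro cs hcs
      have : cs = [] := List.length_eq_zero_iff.mp (Nat.le_zero.mp hcs)
      subst this
      constructor
      · intro stack _; simp [combineRuns]
      · intro acc stack _; simp [combineRuns]
  | succ N ih =>
      intro cs hcs
      cases cs with
      | nil =>
          constructor
          · intro stack _; simp [combineRuns]
          · intro acc stack _; simp [combineRuns]
      | cons c rest =>
          have hrest : rest.length ≤ N := by simpa using Nat.succ_le_succ_iff.mp hcs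
          constructor
          · -- MAIN
            intro stack htop
            by_cases hc : PySem.Chars.isdigit c = true
            · -- start of a digit run: A pushes the single char, then RUN on the rest
              have hstep : combineStep stack c = String.ofList [c] :: stack := by
                cases stack with
                | nil => rfl
                | cons top r =>
                    have : PySem.Chars.strIsdigit top.toList = false := by
                      exact htop top (by simp)
                    simp [combineStep, this]
              have hrun := (ih rest hrest).2 [c] stack
                (by rw [pv_strIsdigit_singleton]; exact hc)
              simp only [List.foldl_cons, hstep, hrun]
              simp [combineRuns, hc]
            · -- non-digit char: A pushes it, top stays non-digit
              have hstep : combineStep stack c = String.ofList [c] :: stack := by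
                cases stack with
                | nil => rfl
                | cons top r => simp [combineStep, hc]
              have hmain := (ih rest hrest).1 (String.ofList [c] :: stack)
                (by intro t ht; simp at ht; subst ht
                    rw [String.toList_ofList, pv_strIsdigit_singleton]; simpa using hc)
              simp only [List.foldl_cons, hstep, hmain]
              simp [combineRuns, hc]
          · -- RUN
            intro acc stack hacc
            by_cases hc : PySem.Chars.isdigit c = true
            · -- digit continues the run: A merges into the top
              have hstep : combineStep (String.ofList acc :: stack) c
                  = String.ofList (combineAccStep acc c) :: stack := by
                simp only [combineStep, String.toList_ofList, hc, hacc, Bool.and_self, if_pos]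
                unfold combineAccStep
                rw [Int.add_comm]
              have hrun := (ih rest hrest).2 (combineAccStep acc c) stack
                (pv_accStep_isdigit acc c hacc hc)
              simp only [List.foldl_cons, hstep, hrun]
              simp [hc]
            · -- run ends: A pushes the non-digit char on top of the finished number
              have hstep : combineStep (String.ofList acc :: stack) c
                  = String.ofList [c] :: String.ofList acc :: stack := by
                simp [combineStep, hc]
              have hmain := (ih rest hrest).1 (String.ofList [c] :: String.ofList acc :: stack)
                (by intro t ht; simp at ht; subst ht
                    rw [String.toList_ofList, pv_strIsdigit_singleton]; simpa using hc)
              simp only [List.foldl_cons, hstep, hmain]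
              simp [combineRuns, hc]

-- ===== VERDICT (by name: the statement is the Claim_ definition above) =====
theorem combineNums_spec : Claim_equal_combineNums := by
  intro s _
  unfold Spec_combineNums combineNums combineNums_alt
  have h := (pv_main_run s.toList.length s.toList (le_refl _)).1 [] (by simp)
  rw [h]
  simp
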